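-- pv_equiv track=rewrite | github.com/sajal1302/hackerrank-codes-in-python | Mathematics/combinatorics/Building_a_list.py | solve
-- ===== SOURCE A (Python) =====
-- from itertools import combinations
--
-- def solve(s):
--     w=[]
--     i=1
--     j2=[character for character in s]
--     while i<=len(s):
--         w+=map(''.join,combinations(j2,i))
--         i+=1
--     return sorted(w)
-- ===== SOURCE B (Python) =====
-- def solve(s):
--     # Build all subsequences with one accumulating pass, drop the empty one, sort.
--     subs = [""]
--     for ch in s:
--         subs += [p + ch for p in subs]
--     return sorted(subs[1:])
-- ===== Notes on version B (the rewrite author's own statement) =====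
-- stated objective: simpler
-- what changed: Replaces the per-length itertools.combinations passes (one pass per subsequence length, concatenated) by a single accumulating powerset pass that doubles the list once per character, then sorts.
import Mathlib
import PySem

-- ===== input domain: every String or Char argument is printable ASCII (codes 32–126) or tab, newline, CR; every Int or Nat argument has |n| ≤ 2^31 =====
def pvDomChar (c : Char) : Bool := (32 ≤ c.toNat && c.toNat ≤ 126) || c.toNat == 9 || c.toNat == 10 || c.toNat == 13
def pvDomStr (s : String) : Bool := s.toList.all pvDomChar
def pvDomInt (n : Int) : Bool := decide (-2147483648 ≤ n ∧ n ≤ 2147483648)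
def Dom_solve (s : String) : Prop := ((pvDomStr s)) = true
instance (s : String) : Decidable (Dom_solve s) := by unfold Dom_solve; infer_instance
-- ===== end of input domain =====

-- B replaces the per-length itertools.combinations passes by a single accumulating
-- powerset pass (objective: simpler); same sorted output.

-- ===== PORT A =====
-- itertools.combinations(l, i) in itertools' (lexicographic index) emission order;
-- ported by hand: exact for lists.
def pvCombA (n : Nat) (l : List Char) : List (List Char) :=
  match n, l with
  | 0, _ => [[]]
  | _ + 1, [] => []
  | n + 1, x :: xs => (pvCombA n xs).map (fun t => x :: t) ++ pvCombA (n + 1) xs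

def solve (s : String) : List String :=
  let j2 := s.toList
  -- while i <= len(s): w += map(''.join, combinations(j2, i)); i += 1
  let w := (List.range j2.length).foldl
    (fun w k => w ++ (pvCombA (k + 1) j2).map (fun cs => String.mk cs)) ([] : List String)
  PySem.List.sorted w (fun x => x) false

-- ===== PORT B =====
-- subs = [""]; for ch in s: subs += [p + ch for p in subs]; return sorted(subs[1:])
def pvGrow (acc : List (List Char)) (c : Char) : List (List Char) :=
  acc ++ acc.map (fun p => p ++ [c])

def solve_alt (s : String) : List String :=
  let subs := s.toList.foldl pvGrow [[]]
  PySem.List.sorted ((subs.drop 1).map (fun cs => String.mk cs)) (fun x => x) false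

-- ===== PRECONDITION & SPEC =====
def Spec_solve (s : String) (out : List String) : Prop := out = solve_alt s
instance (s : String) (out : List String) : Decidable (Spec_solve s out) := by unfold Spec_solve; infer_instance

-- ===== CLAIM (what is proved, stated in full; the proofs are below) =====
def Claim_equal_solve : Prop := ∀ (s : String), Dom_solve s → Spec_solve s (solve s)

-- ===== LEMMAS AND PROOFS =====

-- A's per-length block is a permutation of Mathlib's sublistsLen.
theorem pvCombA_perm (n : Nat) (l : List Char) : (pvCombA n l).Perm (List.sublistsLen n l) := by
  induction l generalizing n with
  | nil => cases n <;> simp [pvCombA]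
  | cons x xs ih =>
    cases n with
    | zero => simp [pvCombA]
    | succ n =>
      rw [pvCombA, List.sublistsLen_succ_cons]
      exact (List.perm_append_comm.trans (((ih (n+1)).append ((ih n).map _))))

-- A's accumulated w, before sorting, as one flatMap.
theorem pvA_foldl_eq (l : List Char) :
    (List.range l.length).foldl
      (fun w k => w ++ (pvCombA (k + 1) l).map (fun cs => String.mk cs)) ([] : List String)
    = ((List.range l.length).flatMap (fun k => pvCombA (k + 1) l)).map (fun cs => String.mk cs) := by
  have h : ∀ (r : List Nat) (acc : List String),
      r.foldl (fun w k => w ++ (pvCombA (k + 1) l).map (fun cs => String.mk cs)) acc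
      = acc ++ (r.flatMap (fun k => pvCombA (k + 1) l)).map (fun cs => String.mk cs) := by
    intro r
    induction r with
    | nil => simp
    | cons k r ih => intro acc; simp [List.foldl_cons, ih, List.flatMap_cons]
  simpa using h (List.range l.length) []

-- A's char-level multiset: [] :: (blocks of lengths 1..n) ~ sublists' l.
theorem pvA_perm (l : List Char) :
    (([] : List Char) :: (List.range l.length).flatMap (fun k => pvCombA (k + 1) l)).Perm
      (List.sublists' l) := by
  have h1 : (([] : List Char) :: (List.range l.length).flatMap (fun k => pvCombA (k + 1) l)).Perm
      ((List.range (l.length + 1)).flatMap (fun n => List.sublistsLen n l)) := by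
    rw [List.range_succ_eq_map, List.flatMap_cons, List.sublistsLen_zero, List.flatMap_map,
      List.singleton_append]
    exact List.Perm.cons _ (List.Perm.flatMap_left _ (fun k _ => pvCombA_perm (k + 1) l))
  exact h1.trans (List.range_bind_sublistsLen_perm l)

-- B's fold over any accumulator, as a permutation.
theorem pvGrow_foldl_perm (l : List Char) (acc : List (List Char)) :
    (l.foldl pvGrow acc).Perm ((List.sublists' l).flatMap (fun t => acc.map (fun p => p ++ t))) := by
  induction l generalizing acc with
  | nil => simp
  | cons c xs ih =>
    rw [List.foldl_cons]
    refine (ih _).trans ?_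
    rw [List.sublists'_cons, List.flatMap_append, List.flatMap_map]
    refine List.Perm.trans ?_ (List.flatMap_append_perm (List.sublists' xs) _ _).symm
    apply List.Perm.flatMap_left
    intro t _
    simp [pvGrow, List.map_map, Function.comp_def, List.append_assoc]
-- B's fold starting at [[]] enumerates sublists' l.
theorem pvB_perm (l : List Char) : (l.foldl pvGrow [[]]).Perm (List.sublists' l) := by
  simpa using pvGrow_foldl_perm l [[]]

-- The head of B's fold stays the empty subsequence.
theorem pvB_head (l : List Char) : ∀ r : List (List Char),
    ∃ t, l.foldl pvGrow (([] : List Char) :: r) = ([] : List Char) :: t := by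
  induction l with
  | nil => intro r; exact ⟨r, rfl⟩
  | cons c xs ih =>
    intro r
    have : pvGrow (([] : List Char) :: r) c
        = ([] : List Char) :: (r ++ ([c] :: r.map (fun p => p ++ [c]))) := by
      simp [pvGrow]
    rw [List.foldl_cons, this]
    exact ih _

-- The char-level lists agree as multisets.
theorem pv_main_perm (l : List Char) :
    ((List.range l.length).flatMap (fun k => pvCombA (k + 1) l)).Perm
      ((l.foldl pvGrow [[]]).drop 1) := by
  obtain ⟨t, ht⟩ := pvB_head l []
  have hb : (([] : List Char) :: t).Perm (List.sublists' l) := ht ▸ pvB_perm l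
  have := (pvA_perm l).trans hb.symm
  rw [ht]
  exact this.cons_inv

-- ===== VERDICT (by name: the statement is the Claim_ definition above) =====
theorem solve_spec : Claim_equal_solve := by
  intro s _
  unfold Spec_solve solve solve_alt
  simp only []
  rw [pvA_foldl_eq]
  exact (PySem.List.sorted_id_eq_sorted_id_iff_perm _ _).mpr ((pv_main_perm s.toList).map _)
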